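-- pv_equiv track=rewrite | github.com/Tay-Son/GH_CT | Algorithm/PRG-Completed/PRG 070130B.py | solution
-- ===== SOURCE A (Python) =====
-- def solution(lst_):
--     from collections import Counter
--
--     N_ = len(lst_)
--     if N_ < 2:
--         return 0
--     else:
--         answer_max = 0
--         for target_, max_ in sorted(list(Counter(lst_).items()), key=lambda x: x[1], reverse=True):
--             if max_ * 2 <= answer_max:
--                 break
--             else:
--                 ptr_ = 0
--                 cnt_ = 0
--                 while ptr_ < N_ - 1:
--                     if lst_[ptr_] != lst_[ptr_ + 1] and (lst_[ptr_] == target_ or lst_[ptr_+1] == target_):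
--                         cnt_ += 2
--                         ptr_ += 2
--                     else:
--                         ptr_ += 1
--                 answer_max = max(answer_max, cnt_)
--
--     return answer_max
-- ===== SOURCE B (Python) =====
-- def solution(lst_):
--     N = len(lst_)
--     if N < 2:
--         return 0
--     pos = {}
--     for i, v in enumerate(lst_):
--         pos.setdefault(v, []).append(i)
--     best = 0
--     for ps in pos.values():
--         cnt = 0
--         ptr = 0
--         for p in ps:
--             if ptr < p and lst_[p - 1] != lst_[p]:
--                 cnt += 2
--                 ptr = p + 1
--             elif ptr <= p and p + 1 < N and lst_[p + 1] != lst_[p]: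
--                 cnt += 2
--                 ptr = p + 2
--             else:
--                 ptr = max(ptr, p + 1)
--         best = max(best, cnt)
--     return best
-- ===== Notes on version B (the rewrite author's own statement) =====
-- stated objective: alternative
-- what changed: B builds each value's occurrence-position list in one grouping pass and replays the greedy adjacent-pair scan by jumping between those positions, instead of A's full rescan of the list per candidate value behind a frequency-sorted early-exit.
import Mathlib
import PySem

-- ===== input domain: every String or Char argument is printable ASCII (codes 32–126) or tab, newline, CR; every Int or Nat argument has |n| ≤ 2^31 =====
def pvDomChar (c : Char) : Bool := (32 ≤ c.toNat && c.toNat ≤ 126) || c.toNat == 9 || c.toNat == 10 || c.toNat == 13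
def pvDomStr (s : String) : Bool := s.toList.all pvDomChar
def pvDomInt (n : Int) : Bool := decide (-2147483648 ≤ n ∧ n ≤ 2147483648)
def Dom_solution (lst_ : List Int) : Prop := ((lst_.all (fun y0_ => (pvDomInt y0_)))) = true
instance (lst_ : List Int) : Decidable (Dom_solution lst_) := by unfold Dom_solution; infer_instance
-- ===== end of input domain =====

-- B replaces A's per-candidate full rescans of the list (behind a frequency-sorted early-exit) by one
-- grouping pass over the occurrence positions of every value, replaying the greedy pairing by jumping
-- between those positions (objective: a structurally different, alternative algorithm).

-- ===== PORT A =====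
-- A's inner while loop: greedy adjacent-pair scan for one target value.
def solAscan (lst_ : List Int) (target_ : Int) (fuel : Nat) (ptr_ : Nat) (cnt_ : Int) : Int :=
  match fuel with
  | 0 => cnt_
  | fuel + 1 =>
    if ptr_ + 1 < lst_.length then
      if lst_.getD ptr_ 0 ≠ lst_.getD (ptr_ + 1) 0 ∧
          (lst_.getD ptr_ 0 = target_ ∨ lst_.getD (ptr_ + 1) 0 = target_) then
        solAscan lst_ target_ fuel (ptr_ + 2) (cnt_ + 2)
      else
        solAscan lst_ target_ fuel (ptr_ + 1) cnt_
    else cnt_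

-- A's for loop over the count-sorted Counter items, with the 'break'.
def solAloop (lst_ : List Int) : List (Int × Int) → Int → Int
  | [], answer_max => answer_max
  | (target_, max_) :: rest, answer_max =>
    if max_ * 2 ≤ answer_max then answer_max
    else solAloop lst_ rest (max answer_max (solAscan lst_ target_ lst_.length 0 0))

def solution (lst_ : List Int) : Int :=
  if (lst_.length : Int) < 2 then 0
  else
    solAloop lst_
      (PySem.List.sorted (PySem.Dict.counter lst_).items (fun x => x.2) true) 0

-- ===== PORT B =====
-- B's inner for loop: replay the greedy pairing by jumping between the occurrence positions ps of one value.
def solBjump (lst_ : List Int) (N : Int) (ps : List Int) (ptr cnt : Int) : Int :=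
  match ps with
  | [] => cnt
  | p :: rest =>
    if ptr < p ∧ PySem.List.pyGetD lst_ (p - 1) 0 ≠ PySem.List.pyGetD lst_ p 0 then
      solBjump lst_ N rest (p + 1) (cnt + 2)
    else if ptr ≤ p ∧ p + 1 < N ∧ PySem.List.pyGetD lst_ (p + 1) 0 ≠ PySem.List.pyGetD lst_ p 0 then
      solBjump lst_ N rest (p + 2) (cnt + 2)
    else
      solBjump lst_ N rest (max ptr (p + 1)) cnt

-- B's first loop: pos.setdefault(v, []).append(i) over enumerate(lst_).
def solBpos (lst_ : List Int) : PySem.Dict Int (List Int) :=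
  (PySem.List.enumerate lst_).foldl
    (fun d iv => d.modify iv.2 [] (· ++ [iv.1])) PySem.Dict.empty

def solution_alt (lst_ : List Int) : Int :=
  if (lst_.length : Int) < 2 then 0
  else
    (solBpos lst_).values.foldl
      (fun best ps => max best (solBjump lst_ (lst_.length : Int) ps 0 0)) 0

-- ===== PRECONDITION & SPEC =====
def Spec_solution (lst_ : List Int) (out : Int) : Prop := out = solution_alt lst_
instance (lst_ : List Int) (out : Int) : Decidable (Spec_solution lst_ out) := by unfold Spec_solution; infer_instance

-- ===== CLAIM (what is proved, stated in full; the proofs are below) =====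
def Claim_equal_solution : Prop := ∀ (lst_ : List Int), Dom_solution lst_ → Spec_solution lst_ (solution lst_)

-- ===== LEMMAS AND PROOFS =====

-- Reference form of A's inner scan: structural recursion on the list suffix.
def pvS (t : Int) : List Int → Int
  | a :: b :: r => if a ≠ b ∧ (a = t ∨ b = t) then 2 + pvS t r else pvS t (b :: r)
  | _ => 0

lemma pvS_small (t : Int) (l : List Int) (h : l.length ≤ 1) : pvS t l = 0 := by
  match l, h with
  | [], _ => rfl
  | [a], _ => rfl

lemma drop_two (l : List Int) (n : Nat) (h : n + 1 < l.length) :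
    l.drop n = l.getD n 0 :: l.getD (n+1) 0 :: l.drop (n+2) := by
  rw [List.drop_eq_getElem_cons (by omega : n < l.length),
      List.drop_eq_getElem_cons (by omega : n + 1 < l.length),
      List.getD_eq_getElem l 0 (by omega : n < l.length),
      List.getD_eq_getElem l 0 (by omega : n + 1 < l.length)]

lemma solAscan_eq (lst_ : List Int) (t : Int) :
    ∀ (fuel ptr : Nat) (cnt : Int), lst_.length ≤ ptr + fuel →
      solAscan lst_ t fuel ptr cnt = cnt + pvS t (lst_.drop ptr) := by
  intro fuel
  induction fuel with
  | zero =>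
    intro ptr cnt h
    rw [solAscan, List.drop_eq_nil_of_le (by omega)]
    show cnt = cnt + 0
    omega
  | succ fuel ih =>
    intro ptr cnt h
    rw [solAscan]
    by_cases hlen : ptr + 1 < lst_.length
    · rw [if_pos hlen]
      by_cases hc : lst_.getD ptr 0 ≠ lst_.getD (ptr + 1) 0 ∧
          (lst_.getD ptr 0 = t ∨ lst_.getD (ptr + 1) 0 = t)
      · rw [if_pos hc, ih (ptr + 2) (cnt + 2) (by omega), drop_two lst_ ptr hlen, pvS, if_pos hc]
        omega
      · rw [if_neg hc, ih (ptr + 1) cnt (by omega), drop_two lst_ ptr hlen, pvS, if_neg hc,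
            List.drop_eq_getElem_cons (by omega : ptr + 1 < lst_.length),
            List.getD_eq_getElem lst_ 0 (by omega : ptr + 1 < lst_.length)]
    · rw [if_neg hlen, pvS_small t _ (by simp [List.length_drop]; omega)]
      omega

lemma pvS_le_count (t : Int) : ∀ l : List Int, pvS t l ≤ 2 * (l.count t : Int) := by
  intro l
  fun_induction pvS t l with
  | case1 a b r hc ih =>
    have h1 : (a :: b :: r).count t = r.count t + (if b = t then 1 else 0) + (if a = t then 1 else 0) := by
      simp [List.count_cons]; try omega
    obtain ⟨hne, h | h⟩ := hc <;> rw [h1] <;> push_cast <;> split_ifs <;> omega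
  | case2 a b r hc ih =>
    have h1 : (a :: b :: r).count t = (b :: r).count t + (if a = t then 1 else 0) := by
      simp [List.count_cons]
    rw [h1]; push_cast; split_ifs <;> omega
  | case3 l h => positivity

-- skipping an occurrence-free stretch does not change the scan
lemma pvS_skip (t : Int) (l : List Int) :
    ∀ (v u : Nat), u ≤ v → (∀ i, u ≤ i → i ≤ v → i < l.length → l.getD i 0 ≠ t) →
      pvS t (l.drop u) = pvS t (l.drop v) := by
  intro v
  induction v with
  | zero => intro u h _; rw [Nat.le_zero.mp h]
  | succ v ih =>
    intro u hu hocc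
    rcases Nat.eq_or_lt_of_le hu with h | h
    · rw [h]
    · have hv : u ≤ v := by omega
      rw [ih u hv (fun i h1 h2 h3 => hocc i h1 (by omega) h3)]
      by_cases hlen : v + 1 < l.length
      · rw [drop_two l v hlen, pvS, if_neg]
        · rw [List.drop_eq_getElem_cons (by omega : v + 1 < l.length),
              List.getD_eq_getElem l 0 (by omega : v + 1 < l.length)]
        · have h1 := hocc v (by omega) (by omega) (by omega)
          have h2 := hocc (v+1) (by omega) (by omega) (by omega)
          tauto
      · rw [pvS_small t _ (by simp [List.length_drop]; omega),
            pvS_small t _ (by simp [List.length_drop]; omega)]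

lemma pvS_zero (t : Int) (l : List Int) :
    ∀ u : Nat, (∀ i, u ≤ i → i < l.length → l.getD i 0 ≠ t) → pvS t (l.drop u) = 0 := by
  intro u hocc
  by_cases h : u ≤ l.length
  · rw [pvS_skip t l l.length u h (fun i h1 h2 h3 => hocc i h1 h3), List.drop_length]; rfl
  · rw [List.drop_eq_nil_of_le (by omega)]; rfl

lemma pyGetD_toNat (l : List Int) (i : Int) (h : 0 ≤ i) :
    PySem.List.pyGetD l i 0 = l.getD i.toNat 0 := by
  conv_lhs => rw [← Int.toNat_of_nonneg h]
  rw [PySem.List.pyGetD_natCast]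

-- the jump replay equals the step-by-step scan
lemma solBjump_eq (lst_ : List Int) (t : Int) :
    ∀ (ps : List Int) (ptr cnt : Int),
      (∀ i : Int, i ∈ ps ↔ (ptr ≤ i ∧ i < (lst_.length : Int) ∧ 0 ≤ i ∧ lst_.getD i.toNat 0 = t)) →
      ps.Pairwise (· < ·) → 0 ≤ ptr →
      solBjump lst_ (lst_.length : Int) ps ptr cnt = cnt + pvS t (lst_.drop ptr.toNat) := by
  intro ps
  induction ps with
  | nil =>
    intro ptr cnt h1 _ hptr
    rw [solBjump, pvS_zero t lst_ ptr.toNat ?_]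
    · omega
    · intro i hi1 hi2 hcon
      have : (i : Int) ∈ ([] : List Int) :=
        (h1 i).mpr ⟨by omega, by omega, by omega, by simpa using hcon⟩
      simp at this
  | cons p rest ih =>
    intro ptr cnt h1 hpw hptr
    obtain ⟨hptrp, hpN, hp0, hpt⟩ := (h1 p).mp List.mem_cons_self
    have hrest_gt : ∀ i ∈ rest, p < i := (List.pairwise_cons.mp hpw).1
    have hpw' := (List.pairwise_cons.mp hpw).2
    have hno : ∀ i : Int, ptr ≤ i → i < p → 0 ≤ i → lst_.getD i.toNat 0 ≠ t := by
      intro i hi1 hi2 hi0 hcon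
      have hmem : i ∈ p :: rest := (h1 i).mpr ⟨hi1, by omega, hi0, hcon⟩
      rcases List.mem_cons.mp hmem with h | h
      · omega
      · exact absurd (hrest_gt i h) (by omega)
    have gp : PySem.List.pyGetD lst_ p 0 = lst_.getD p.toNat 0 := pyGetD_toNat _ _ hp0
    have hpnlt : p.toNat < lst_.length := by omega
    by_cases hlt : ptr < p
    · -- branch 1 fires
      have hp1 : (1:Int) ≤ p := by omega
      have hprev : lst_.getD (p-1).toNat 0 ≠ t := hno (p-1) (by omega) (by omega) (by omega)
      rw [solBjump, if_pos ⟨hlt, by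
        rw [gp, pyGetD_toNat _ _ (by omega : (0:Int) ≤ p - 1), hpt]; exact hprev⟩]
      have h1' : ∀ i : Int, i ∈ rest ↔ (p + 1 ≤ i ∧ i < (lst_.length : Int) ∧ 0 ≤ i ∧ lst_.getD i.toNat 0 = t) := by
        intro i
        constructor
        · intro hi
          obtain ⟨a, b, c, d⟩ := (h1 i).mp (List.mem_cons_of_mem _ hi)
          exact ⟨by have := hrest_gt i hi; omega, b, c, d⟩
        · intro ⟨a, b, c, d⟩
          rcases List.mem_cons.mp ((h1 i).mpr ⟨by omega, b, c, d⟩) with h | h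
          · omega
          · exact h
      rw [ih (p+1) (cnt+2) h1' hpw' (by omega)]
      -- now the pvS bookkeeping
      have hskip : pvS t (lst_.drop ptr.toNat) = pvS t (lst_.drop (p-1).toNat) := by
        apply pvS_skip t lst_ (p-1).toNat ptr.toNat (by omega)
        intro i hi1 hi2 hi3
        have := hno (i : Int) (by omega) (by omega) (by omega)
        simpa using this
      have e1 : (p-1).toNat + 1 = p.toNat := by omega
      have e2 : (p-1).toNat + 2 = (p+1).toNat := by omega
      have hlen : (p-1).toNat + 1 < lst_.length := by omega
      rw [hskip, drop_two lst_ _ hlen, e1, e2, pvS, if_pos ⟨by rw [hpt]; exact hprev, Or.inr hpt⟩]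
      omega
    · -- ptr = p
      have hpe : ptr = p := by omega
      rw [solBjump, if_neg (by intro h; exact hlt h.1)]
      by_cases hb2 : p + 1 < (lst_.length : Int) ∧ lst_.getD (p.toNat + 1) 0 ≠ t
      · rw [if_pos ⟨by omega, hb2.1, by
          rw [gp, pyGetD_toNat _ _ (by omega : (0:Int) ≤ p + 1), hpt]
          have e : (p+1).toNat = p.toNat + 1 := by omega
          rw [e]; exact hb2.2⟩]
        have h1'' : ∀ i : Int, i ∈ rest ↔ (p + 2 ≤ i ∧ i < (lst_.length : Int) ∧ 0 ≤ i ∧ lst_.getD i.toNat 0 = t) := by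
          intro i
          constructor
          · intro hi
            obtain ⟨a, b, c, d⟩ := (h1 i).mp (List.mem_cons_of_mem _ hi)
            have hgt := hrest_gt i hi
            have : i ≠ p + 1 := by
              intro he; subst he
              have e : (p+1).toNat = p.toNat + 1 := by omega
              rw [e] at d; exact hb2.2 d
            exact ⟨by omega, b, c, d⟩
          · intro ⟨a, b, c, d⟩
            rcases List.mem_cons.mp ((h1 i).mpr ⟨by omega, b, c, d⟩) with h | h
            · omega
            · exact h
        rw [ih (p+2) (cnt+2) h1'' hpw' (by omega)]
        have hlen : p.toNat + 1 < lst_.length := by omega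
        have e2 : (p+2).toNat = p.toNat + 2 := by omega
        rw [hpe, drop_two lst_ _ hlen, e2, pvS, if_pos ⟨by rw [hpt]; exact fun h => hb2.2 h.symm, Or.inl hpt⟩]
        omega
      · rw [if_neg (by
          intro ⟨a, b, c⟩
          apply hb2
          refine ⟨b, ?_⟩
          rw [gp, pyGetD_toNat _ _ (by omega : (0:Int) ≤ p + 1), hpt] at c
          have e : (p+1).toNat = p.toNat + 1 := by omega
          rw [e] at c
          exact fun h => c (by rw [h]))]
        have hmax : max ptr (p + 1) = p + 1 := by omega
        have h1''' : ∀ i : Int, i ∈ rest ↔ (p + 1 ≤ i ∧ i < (lst_.length : Int) ∧ 0 ≤ i ∧ lst_.getD i.toNat 0 = t) := by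
          intro i
          constructor
          · intro hi
            obtain ⟨a, b, c, d⟩ := (h1 i).mp (List.mem_cons_of_mem _ hi)
            exact ⟨by have := hrest_gt i hi; omega, b, c, d⟩
          · intro ⟨a, b, c, d⟩
            rcases List.mem_cons.mp ((h1 i).mpr ⟨by omega, b, c, d⟩) with h | h
            · omega
            · exact h
        rw [hmax, ih (p+1) cnt h1''' hpw' (by omega)]
        have e1 : (p+1).toNat = p.toNat + 1 := by omega
        have hstep : pvS t (lst_.drop p.toNat) = pvS t (lst_.drop (p.toNat + 1)) := by
          by_cases hlen : p.toNat + 1 < lst_.length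
          · have hb : lst_.getD (p.toNat + 1) 0 = t := by
              by_contra hcon
              exact hb2 ⟨by omega, hcon⟩
            rw [drop_two lst_ _ hlen, pvS, if_neg (by rw [hpt, hb]; simp),
                List.drop_eq_getElem_cons (by omega : p.toNat + 1 < lst_.length),
                List.getD_eq_getElem lst_ 0 (by omega : p.toNat + 1 < lst_.length)]
          · rw [pvS_small t _ (by simp [List.length_drop]; omega),
                pvS_small t _ (by simp [List.length_drop]; omega)]
        rw [hpe, hstep, e1]

-- reference form of the occurrence-position lists B's dict holds
def pvPos (c : Int) : List Int → Int → List Int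
  | [], _ => []
  | x :: xs, s => if x = c then s :: pvPos c xs (s + 1) else pvPos c xs (s + 1)

lemma enumerate_cons (x : Int) (xs : List Int) (s : Int) :
    PySem.List.enumerate (x :: xs) s = (s, x) :: PySem.List.enumerate xs (s + 1) := by
  simp [PySem.List.enumerate]

lemma pvPos_eq (c : Int) :
    ∀ (l : List Int) (s : Int),
      ((PySem.List.enumerate l s).filter (fun iv => iv.2 == c)).map (·.1) = pvPos c l s := by
  intro l
  induction l with
  | nil => intro s; simp [PySem.List.enumerate, pvPos]
  | cons x xs ih =>
    intro s
    rw [enumerate_cons, pvPos]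
    by_cases h : x = c
    · simp [List.filter_cons, h, ih]
    · simp [List.filter_cons, h, ih]

lemma mem_pvPos (c : Int) :
    ∀ (l : List Int) (s i : Int),
      i ∈ pvPos c l s ↔ ∃ k : Nat, k < l.length ∧ i = s + k ∧ l.getD k 0 = c := by
  intro l
  induction l with
  | nil => intro s i; simp [pvPos]
  | cons x xs ih =>
    intro s i
    rw [pvPos]
    constructor
    · intro h
      by_cases hx : x = c
      · rw [if_pos hx] at h
        rcases List.mem_cons.mp h with h | h
        · exact ⟨0, by simpa [h] using hx⟩
        · obtain ⟨k, hk1, hk2, hk3⟩ := (ih (s+1) i).mp h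
          exact ⟨k + 1, by simpa using hk1, by push_cast; omega, by simpa using hk3⟩
      · rw [if_neg hx] at h
        obtain ⟨k, hk1, hk2, hk3⟩ := (ih (s+1) i).mp h
        exact ⟨k + 1, by simpa using hk1, by push_cast; omega, by simpa using hk3⟩
    · intro ⟨k, hk1, hk2, hk3⟩
      match k with
      | 0 =>
        simp at hk3 hk2
        rw [if_pos (by simpa using hk3)]
        simp [hk2]
      | Nat.succ k' =>
        have hm : i ∈ pvPos c xs (s + 1) :=
          (ih (s+1) i).mpr ⟨k', by simpa using hk1, by push_cast at hk2 ⊢; omega, by simpa using hk3⟩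
        by_cases hx : x = c
        · rw [if_pos hx]; exact List.mem_cons_of_mem _ hm
        · rw [if_neg hx]; exact hm

lemma pvPos_lb (c : Int) :
    ∀ (l : List Int) (s : Int), ∀ i ∈ pvPos c l s, s ≤ i := by
  intro l s i hi
  obtain ⟨k, _, hk2, _⟩ := (mem_pvPos c l s i).mp hi
  omega

lemma pvPos_pairwise (c : Int) :
    ∀ (l : List Int) (s : Int), (pvPos c l s).Pairwise (· < ·) := by
  intro l
  induction l with
  | nil => intro s; simp [pvPos]
  | cons x xs ih =>
    intro s
    rw [pvPos]
    by_cases hx : x = c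
    · rw [if_pos hx]
      exact List.pairwise_cons.mpr ⟨fun i hi => by have := pvPos_lb c xs (s+1) i hi; omega, ih (s+1)⟩
    · rw [if_neg hx]; exact ih (s + 1)

lemma solBpos_getD_aux (c : Int) :
    ∀ (l : List (Int × Int)) (d : PySem.Dict Int (List Int)),
      (l.foldl (fun d iv => d.modify iv.2 [] (· ++ [iv.1])) d).getD c [] =
        d.getD c [] ++ (l.filter (fun iv => iv.2 == c)).map (·.1) := by
  intro l
  induction l with
  | nil => intro d; simp
  | cons iv l ih =>
    intro d
    rw [List.foldl_cons, ih, List.filter_cons]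
    by_cases h : iv.2 = c
    · simp [h, PySem.Dict.getD_modify]
    · simp [h, PySem.Dict.getD_modify]
      intro hc
      exact absurd hc.symm h

lemma solBpos_getD (lst_ : List Int) (c : Int) :
    (solBpos lst_).getD c [] = pvPos c lst_ 0 := by
  rw [solBpos, solBpos_getD_aux, pvPos_eq]
  simp

lemma enumerate_map_snd : ∀ (l : List Int) (s : Int), (PySem.List.enumerate l s).map (·.2) = l := by
  intro l
  induction l with
  | nil => intro s; simp [PySem.List.enumerate]
  | cons x xs ih => intro s; rw [enumerate_cons]; simp [ih]

lemma solBpos_keys (lst_ : List Int) : (solBpos lst_).keys = PySem.Set.ofList lst_ := by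
  have h := PySem.Dict.keys_foldl_modify_key (PySem.List.enumerate lst_)
    (fun iv : Int × Int => iv.2) ([] : List Int) (fun _ iv v => v ++ [iv.1]) PySem.Dict.empty
  rw [PySem.Dict.keys_empty, enumerate_map_snd] at h
  exact h.trans (PySem.Set.update_empty lst_)

lemma solBpos_keys_nodup (lst_ : List Int) : (solBpos lst_).keys.Nodup := by
  rw [solBpos_keys]
  exact PySem.Set.nodup_ofList lst_

-- a fold of maxes whose entries are all below the accumulator is the accumulator
lemma foldl_max_le (f : Int × Int → Int) :
    ∀ (l : List (Int × Int)) (acc : Int), (∀ q ∈ l, f q ≤ acc) →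
      l.foldl (fun a q => max a (f q)) acc = acc := by
  intro l
  induction l with
  | nil => intro acc _; rfl
  | cons q l ih =>
    intro acc h
    rw [List.foldl_cons, show max acc (f q) = acc by have := h q List.mem_cons_self; omega]
    exact ih acc (fun q hq => h q (List.mem_cons_of_mem _ hq))

-- A's break never loses the maximum: the skipped candidates are bounded by twice their count
lemma solAloop_eq (lst_ : List Int) :
    ∀ (items : List (Int × Int)) (acc : Int),
      items.Pairwise (fun a b => b.2 ≤ a.2) →
      (∀ q ∈ items, pvS q.1 lst_ ≤ 2 * q.2) →
      solAloop lst_ items acc = items.foldl (fun a q => max a (pvS q.1 lst_)) acc := by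
  intro items
  induction items with
  | nil => intro acc _ _; rfl
  | cons q rest ih =>
    intro acc hpw hb
    obtain ⟨t, c⟩ := q
    rw [solAloop]
    by_cases hbr : c * 2 ≤ acc
    · rw [if_pos hbr, List.foldl_cons]
      have hhead : pvS t lst_ ≤ acc := by have := hb (t, c) List.mem_cons_self; simp at this; omega
      rw [show max acc (pvS t lst_) = acc by omega]
      refine (foldl_max_le (fun q => pvS q.1 lst_) rest acc ?_).symm
      intro q hq
      have h1 := hb q (List.mem_cons_of_mem _ hq)
      have h2 := (List.pairwise_cons.mp hpw).1 q hq
      simp at h2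
      show pvS q.1 lst_ ≤ acc
      omega
    · rw [if_neg hbr, List.foldl_cons]
      have hs : solAscan lst_ t lst_.length 0 0 = pvS t lst_ := by
        rw [solAscan_eq lst_ t lst_.length 0 0 (by omega)]; simp
      rw [hs]
      exact ih (max acc (pvS t lst_)) (List.pairwise_cons.mp hpw).2
        (fun q hq => hb q (List.mem_cons_of_mem _ hq))

-- a fold of maxes of a projection is permutation-invariant
lemma foldl_max_perm {α : Type} (f : α → Int) {l₁ l₂ : List α} (hp : l₁.Perm l₂) :
    ∀ acc : Int, l₁.foldl (fun a q => max a (f q)) acc = l₂.foldl (fun a q => max a (f q)) acc := by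
  induction hp with
  | nil => intro acc; rfl
  | cons x _ ih => intro acc; rw [List.foldl_cons, List.foldl_cons, ih]
  | swap x y l =>
    intro acc
    simp only [List.foldl_cons]
    rw [show max (max acc (f y)) (f x) = max (max acc (f x)) (f y) by omega]
  | trans _ _ ih1 ih2 => intro acc; rw [ih1, ih2]

theorem solution_eq_alt (lst_ : List Int) : solution lst_ = solution_alt lst_ := by
  unfold solution solution_alt
  by_cases hN : (lst_.length : Int) < 2
  · rw [if_pos hN, if_pos hN]
  · rw [if_neg hN, if_neg hN]
    have hsortpw : (PySem.List.sorted (PySem.Dict.counter lst_).items (fun x => x.2) true).Pairwise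
        (fun a b => b.2 ≤ a.2) := PySem.List.sorted_pairwise_rev _ _
    have hbound : ∀ q ∈ PySem.List.sorted (PySem.Dict.counter lst_).items (fun x => x.2) true,
        pvS q.1 lst_ ≤ 2 * q.2 := by
      intro q hq
      have hq' : q ∈ (PySem.Dict.counter lst_).items := by
        have := PySem.List.sorted_perm (PySem.Dict.counter lst_).items (fun x => x.2) true
        exact this.mem_iff.mp hq
      rw [PySem.Dict.items_counter] at hq'
      obtain ⟨k, hk, rfl⟩ := List.mem_map.mp hq'
      simpa using pvS_le_count k lst_
    rw [solAloop_eq lst_ _ 0 hsortpw hbound,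
        foldl_max_perm (fun q => pvS q.1 lst_)
          (PySem.List.sorted_perm (PySem.Dict.counter lst_).items (fun x => x.2) true) 0,
        PySem.Dict.items_counter, List.foldl_map,
        PySem.Dict.values_eq_map_keys (solBpos lst_) (solBpos_keys_nodup lst_) [],
        List.foldl_map, solBpos_keys]
    apply PySem.List.foldl_congr_mem
    intro acc k hk
    have hjump : solBjump lst_ (lst_.length : Int) ((solBpos lst_).getD k []) 0 0 = pvS k lst_ := by
      rw [solBpos_getD]
      have h := solBjump_eq lst_ k (pvPos k lst_ 0) 0 0 ?_ (pvPos_pairwise k lst_ 0) le_rfl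
      · simpa using h
      · intro i
        rw [mem_pvPos]
        constructor
        · intro ⟨kk, h1, h2, h3⟩
          refine ⟨by omega, by omega, by omega, ?_⟩
          have : i.toNat = kk := by omega
          rw [this]; exact h3
        · intro ⟨h1, h2, h3, h4⟩
          exact ⟨i.toNat, by omega, by omega, h4⟩
    rw [hjump]

-- ===== VERDICT (by name: the statement is the Claim_ definition above) =====
theorem solution_spec : Claim_equal_solution := by
  intro lst_ _
  exact solution_eq_alt lst_
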